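-- pv_equiv track=rewrite | github.com/qcqced123/model_study | dataset_class/preprocessing.py | adjust_sequences
-- ===== SOURCE A (Python) =====
-- from typing import List, Tuple, Dict, Callable, Any
--
-- def adjust_sequences(sequences: List, max_len: int):
--     """ Similar to dynamic padding concept
--     Append slicing index from original, because original source code is implemented weired
--     So it generates some problem for applying very longer sequence
--     Add -1 value to slicing index, so we can get result what we want
--
--     Args:
--         sequences: list of each cell's token sequence in one unique notebook id, must pass tokenized sequence input_ids
--         => sequences = [[1,2,3,4,5,6], [1,2,3,4,5,6], ... , [1,2,3,4,5]]
--         max_len: max length of sequence into LLM Embedding Layer, default is 2048 for DeBERTa-V3-Large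
--
--     Reference:
--          https://github.com/louis-she/ai4code/blob/master/ai4code/utils.py#L70
--     """
--     length_of_seqs = [len(seq) for seq in sequences]
--     total_len = sum(length_of_seqs)
--     cut_off = total_len - max_len
--     if cut_off <= 0:
--         return sequences, length_of_seqs
--
--     for _ in range(cut_off):
--         max_index = length_of_seqs.index(max(length_of_seqs))
--         length_of_seqs[max_index] -= 1
--     sequences = [sequences[i][:l-1] for i, l in enumerate(length_of_seqs)]
--     return sequences, length_of_seqs
-- ===== SOURCE B (Python) =====
-- def adjust_sequences(sequences, max_len):
--     """Water-filling re-implementation: binary-search the level L such that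
--     clipping every length to L uses at most max_len tokens, then give the
--     last remainder indices among the still-longer sequences one extra token."""
--     lens = [len(s) for s in sequences]
--     total = sum(lens)
--     if total <= max_len:
--         return sequences, lens
--
--     def filled(level):
--         return sum(l if l < level else level for l in lens)
--
--     # largest L with filled(L) <= max_len; invariant filled(lo) <= max_len < filled(hi)
--     lo, hi = max_len // len(lens), max(lens)
--     while hi - lo > 1:
--         mid = (lo + hi) // 2
--         if filled(mid) <= max_len:
--             lo = mid
--         else:
--             hi = mid
--     level = lo
--     r = max_len - filled(level)  # this many sequences keep level+1 tokens
--
--     new_lens = []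
--     seen = 0
--     for l in reversed(lens):
--         if l > level:
--             seen += 1
--             new_lens.append(level + 1 if seen <= r else level)
--         else:
--             new_lens.append(l)
--     new_lens.reverse()
--     return [s[:l - 1] for s, l in zip(sequences, new_lens)], new_lens
-- ===== Notes on version B (the rewrite author's own statement) =====
-- stated objective: faster
-- what changed: Replaces the cut_off-iteration argmax-and-decrement loop with water-filling: binary search for the clip level over total clipped length, then one reverse pass distributing the remainder to the last longer sequences.
import Mathlib
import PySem

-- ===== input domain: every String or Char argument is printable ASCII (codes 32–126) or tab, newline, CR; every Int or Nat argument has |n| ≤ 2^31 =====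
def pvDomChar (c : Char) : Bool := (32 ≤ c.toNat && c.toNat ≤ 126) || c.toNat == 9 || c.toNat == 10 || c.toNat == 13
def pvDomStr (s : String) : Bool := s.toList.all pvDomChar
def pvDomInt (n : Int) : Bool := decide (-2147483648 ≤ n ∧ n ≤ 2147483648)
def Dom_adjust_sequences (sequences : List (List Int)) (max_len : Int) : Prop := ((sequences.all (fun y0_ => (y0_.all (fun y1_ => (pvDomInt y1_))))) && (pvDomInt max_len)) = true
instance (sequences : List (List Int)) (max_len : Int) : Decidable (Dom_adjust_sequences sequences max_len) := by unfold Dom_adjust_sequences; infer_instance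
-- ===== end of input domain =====

-- B replaces A's cut_off-iteration argmax-decrement loop by water-filling (binary-search the
-- clip level, distribute the remainder in one reverse pass); equivalence of return values proved.

-- ===== PORT A =====
-- literal transliteration of A: per-iteration `max` + `.index` + in-place decrement,
-- then slicing each sequence to its (reduced length - 1).
def adjust_sequences (sequences : List (List Int)) (max_len : Int) : List (List Int) × List Int :=
  let length_of_seqs : List Int := sequences.map (fun seq => (seq.length : Int))
  let total_len : Int := length_of_seqs.sum
  let cut_off : Int := total_len - max_len
  if cut_off ≤ 0 then (sequences, length_of_seqs)
  else
    let ls : List Int := (PySem.List.pyRange 0 cut_off 1).foldl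
      (fun ls _ =>
        let mx := (PySem.List.max? ls (fun x => x)).getD 0   -- max(ls); ls nonempty under Pre_
        let max_index := (PySem.List.index? ls mx).getD 0
        ls.set max_index (ls.getD max_index 0 - 1)) length_of_seqs
    ((PySem.List.enumerate ls 0).map
        (fun p => PySem.List.slice (PySem.List.pyGetD sequences p.1 []) none (some (p.2 - 1))),
     ls)

-- ===== PORT B =====
def pvFilled (lens : List Int) (level : Int) : Int :=
  (lens.map (fun l => if l < level then l else level)).sum

-- midpoint of Python's `(lo + hi) // 2` is strictly between lo and hi (used for termination)
theorem pvMidBounds (lo hi : Int) (h : lo + 2 ≤ hi) :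
    lo + 1 ≤ PySem.Int.floordiv (lo + hi) 2 ∧ PySem.Int.floordiv (lo + hi) 2 + 1 ≤ hi := by
  rw [PySem.Int.floordiv_eq_ediv_of_pos (by omega : (0:Int) < 2)]
  omega

-- the `while hi - lo > 1` loop of B
def pvBsearch (lens : List Int) (max_len : Int) (lo hi : Int) : Int :=
  if h : hi - lo ≤ 1 then lo
  else
    let mid := PySem.Int.floordiv (lo + hi) 2
    if pvFilled lens mid ≤ max_len then pvBsearch lens max_len mid hi
    else pvBsearch lens max_len lo mid
termination_by (hi - lo).toNat
decreasing_by
  · have := pvMidBounds lo hi (by omega); omega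
  · have := pvMidBounds lo hi (by omega); omega

-- B's reverse pass: `for l in reversed(lens): ...` building new_lens with the `seen` counter
def pvRevBuild (rlens : List Int) (level r seen : Int) : List Int :=
  match rlens with
  | [] => []
  | l :: rest =>
    if level < l then
      (if seen + 1 ≤ r then level + 1 else level) :: pvRevBuild rest level r (seen + 1)
    else l :: pvRevBuild rest level r seen

def adjust_sequences_alt (sequences : List (List Int)) (max_len : Int) : List (List Int) × List Int :=
  let lens : List Int := sequences.map (fun s => (s.length : Int))
  let total : Int := lens.sum
  if total ≤ max_len then (sequences, lens)
  else
    let lo := PySem.Int.floordiv max_len (lens.length : Int)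
    let hi := (PySem.List.max? lens (fun x => x)).getD 0
    let level := pvBsearch lens max_len lo hi
    let r := max_len - pvFilled lens level
    let new_lens := (pvRevBuild lens.reverse level r 0).reverse
    ((sequences.zip new_lens).map (fun p => PySem.List.slice p.1 none (some (p.2 - 1))),
     new_lens)

-- ===== PRECONDITION & SPEC =====
-- Pre_ excludes only sequences = [] with max_len < 0: there Python A raises ValueError
-- (max() of an empty list), and B raises ZeroDivisionError; A returns on everything else.
def Pre_adjust_sequences (sequences : List (List Int)) (max_len : Int) : Prop :=
  sequences ≠ [] ∨ 0 ≤ max_len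
instance (sequences : List (List Int)) (max_len : Int) : Decidable (Pre_adjust_sequences sequences max_len) := by unfold Pre_adjust_sequences; infer_instance

def pvWitness_adjust_sequences : List (List Int) × Int := ([[7, 8], [9]], 2)

def Spec_adjust_sequences (sequences : List (List Int)) (max_len : Int) (out : List (List Int) × List Int) : Prop := out = adjust_sequences_alt sequences max_len
instance (sequences : List (List Int)) (max_len : Int) (out : List (List Int) × List Int) : Decidable (Spec_adjust_sequences sequences max_len out) := by unfold Spec_adjust_sequences; infer_instance

-- ===== CLAIM (what is proved, stated in full; the proofs are below) =====
def Claim_equal_adjust_sequences : Prop := ∀ (sequences : List (List Int)) (max_len : Int), Dom_adjust_sequences sequences max_len → Pre_adjust_sequences sequences max_len → Spec_adjust_sequences sequences max_len (adjust_sequences sequences max_len)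

-- ===== LEMMAS AND PROOFS =====

-- number of entries strictly above `level`, as an Int
def pvCnt (lens : List Int) (level : Int) : Int :=
  ((lens.countP (fun l => decide (level < l)) : Nat) : Int)

-- abstract water-filled state: entry i is level+1 for the last r entries above level, else min
def pvWf (lens : List Int) (level r : Int) : List Int :=
  match lens with
  | [] => []
  | x :: xs =>
    (if level < x ∧ pvCnt xs level < r then level + 1 else min x level) :: pvWf xs level r

-- one iteration of A's loop
def pvGstep (s : List Int) : List Int :=
  let mx := (PySem.List.max? s (fun x => x)).getD 0
  let max_index := (PySem.List.index? s mx).getD 0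
  s.set max_index (s.getD max_index 0 - 1)

-- decrement of the first occurrence of v
def pvDecFirst (s : List Int) (v : Int) : List Int :=
  match s with
  | [] => []
  | x :: xs => if x = v then (x - 1) :: xs else x :: pvDecFirst xs v

-- the invariant tying A's loop state after total-m decrements to the pair (level, r)
def pvInv (lens : List Int) (m level r : Int) : Prop :=
  pvFilled lens level ≤ m ∧ m < pvFilled lens (level + 1) ∧ r = m - pvFilled lens level

theorem pvCnt_nonneg (lens : List Int) (level : Int) : 0 ≤ pvCnt lens level := by
  simp [pvCnt]

theorem pvCnt_cons (x : Int) (xs : List Int) (level : Int) :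
    pvCnt (x :: xs) level = pvCnt xs level + (if level < x then 1 else 0) := by
  simp only [pvCnt, List.countP_cons, decide_eq_true_eq]
  split_ifs with h <;> push_cast <;> omega

theorem pvCnt_mono (lens : List Int) {a b : Int} (h : a ≤ b) :
    pvCnt lens b ≤ pvCnt lens a := by
  induction lens with
  | nil => simp [pvCnt]
  | cons x xs ih => rw [pvCnt_cons, pvCnt_cons]; split_ifs <;> omega

theorem pvCnt_pos (lens : List Int) (level x : Int) (hx : x ∈ lens) (hlt : level < x) :
    1 ≤ pvCnt lens level := by
  have : 0 < lens.countP (fun l => decide (level < l)) := by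
    rw [List.countP_pos_iff]
    exact ⟨x, hx, by simpa using hlt⟩
  unfold pvCnt; omega

theorem pvFilled_mono (lens : List Int) {a b : Int} (h : a ≤ b) :
    pvFilled lens a ≤ pvFilled lens b := by
  induction lens with
  | nil => simp [pvFilled]
  | cons x xs ih =>
    simp only [pvFilled, List.map_cons, List.sum_cons] at *
    split_ifs <;> omega

theorem pvFilled_succ (lens : List Int) (level : Int) :
    pvFilled lens (level + 1) = pvFilled lens level + pvCnt lens level := by
  induction lens with
  | nil => simp [pvFilled, pvCnt]
  | cons x xs ih =>
    simp only [pvFilled, List.map_cons, List.sum_cons] at *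
    rw [pvCnt_cons]
    split_ifs <;> omega

theorem pvFilled_le (lens : List Int) (level : Int) :
    pvFilled lens level ≤ (lens.length : Int) * level := by
  induction lens with
  | nil => simp [pvFilled]
  | cons x xs ih =>
    simp only [pvFilled, List.map_cons, List.sum_cons, List.length_cons] at *
    have h1 : (if x < level then x else level) ≤ level := by split_ifs <;> omega
    push_cast
    nlinarith [ih, h1]

theorem pvFilled_of_le (lens : List Int) (M : Int) (h : ∀ l ∈ lens, l ≤ M) :
    pvFilled lens M = lens.sum := by
  induction lens with
  | nil => simp [pvFilled]
  | cons x xs ih =>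
    simp only [pvFilled, List.map_cons, List.sum_cons] at *
    have hx := h x (by simp)
    rw [ih (fun l hl => h l (by simp [hl]))]
    split_ifs <;> omega

theorem pvWf_length (lens : List Int) (level r : Int) :
    (pvWf lens level r).length = lens.length := by
  induction lens with
  | nil => rfl
  | cons x xs ih => simp [pvWf, ih]

theorem pvWf_le (lens : List Int) (level r : Int) :
    ∀ y ∈ pvWf lens level r, y ≤ level + 1 := by
  induction lens with
  | nil => simp [pvWf]
  | cons x xs ih =>
    intro y hy
    simp only [pvWf, List.mem_cons] at hy
    rcases hy with hy | hy
    · subst hy; split_ifs <;> omega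
    · exact ih y hy

-- saturated remainder: everything above level gets level+1
theorem pvWf_saturated (lens : List Int) (level r : Int) (h : pvCnt lens level ≤ r) :
    pvWf lens level r = lens.map (fun l => min l (level + 1)) := by
  induction lens with
  | nil => rfl
  | cons x xs ih =>
    rw [pvCnt_cons] at h
    have hxs : pvCnt xs level ≤ r := by split_ifs at h <;> omega
    simp only [pvWf, List.map_cons, ih hxs, List.cons.injEq, and_true]
    split_ifs at h ⊢ <;> omega

theorem pvWf_zero (lens : List Int) (level r : Int) (h : r ≤ 0) :
    pvWf lens level r = lens.map (fun l => min l level) := by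
  induction lens with
  | nil => rfl
  | cons x xs ih =>
    have hc := pvCnt_nonneg xs level
    simp only [pvWf, List.map_cons, ih, List.cons.injEq, and_true]
    split_ifs <;> omega

theorem pvWf_mem_top (lens : List Int) (level r : Int) (h0 : 0 < r)
    (h1 : r ≤ pvCnt lens level) : (level + 1) ∈ pvWf lens level r := by
  induction lens with
  | nil => simp [pvCnt] at h1; omega
  | cons x xs ih =>
    rw [pvCnt_cons] at h1
    simp only [pvWf, List.mem_cons]
    by_cases hb : level < x ∧ pvCnt xs level < r
    · rw [if_pos hb]; left; rfl
    · rw [if_neg hb]; right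
      apply ih
      rcases Decidable.not_and_iff_not_or_not.mp hb with hx | hc
      · split_ifs at h1 <;> omega
      · omega

theorem map_min_self (lens : List Int) (M : Int) (h : ∀ l ∈ lens, l ≤ M) :
    lens.map (fun l => min l M) = lens := by
  induction lens with
  | nil => rfl
  | cons x xs ih =>
    have hx := h x (by simp)
    simp only [List.map_cons, ih (fun l hl => h l (by simp [hl])), List.cons.injEq, and_true]
    omega

theorem pvMax_eq (s : List Int) (v : Int) (hmem : v ∈ s) (hub : ∀ y ∈ s, y ≤ v) :
    (PySem.List.max? s (fun x => x)).getD 0 = v := by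
  cases hmax : PySem.List.max? s (fun x => x) with
  | none =>
    rw [PySem.List.max?_eq_none_iff] at hmax
    subst hmax; simp at hmem
  | some m =>
    have hm : m ∈ s := PySem.List.max?_mem hmax
    have h1 : m ≤ v := hub m hm
    have h2 : v ≤ m := PySem.List.max?_isMax hmax v hmem
    simp [Option.getD]; omega

theorem pvSet_pre (pre suf : List Int) (m : Int) (hm : m ∉ pre) :
    (pre ++ m :: suf).set pre.length ((pre ++ m :: suf).getD pre.length 0 - 1)
      = pvDecFirst (pre ++ m :: suf) m := by
  induction pre with
  | nil => simp [pvDecFirst]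
  | cons p pre ih =>
    have hp : ¬ (p = m) := by intro h; exact hm (by simp [h])
    simp only [List.cons_append, List.length_cons, List.set_cons_succ, List.getD_cons_succ,
      pvDecFirst, if_neg hp, List.cons.injEq, true_and]
    exact ih (by intro h; exact hm (by simp [h]))

theorem pvGstep_eq_decFirst (s : List Int) (hs : s ≠ []) :
    pvGstep s = pvDecFirst s ((PySem.List.max? s (fun x => x)).getD 0) := by
  cases hmax : PySem.List.max? s (fun x => x) with
  | none => rw [PySem.List.max?_eq_none_iff] at hmax; exact absurd hmax hs
  | some m =>
    have hm : m ∈ s := PySem.List.max?_mem hmax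
    have hidx : ∃ k, PySem.List.index? s m = some k := by
      rw [← Option.isSome_iff_exists]
      exact (PySem.List.index?_isSome_iff s m).mpr hm
    obtain ⟨k, hk⟩ := hidx
    obtain ⟨pre, suf, hdecomp, hklen, hnotin⟩ := (PySem.List.index?_eq_some_iff s m k).mp hk
    subst hdecomp
    simp only [pvGstep, hmax, hk, Option.getD_some]
    subst hklen
    exact pvSet_pre pre suf m hnotin

theorem pvDecFirst_wf_pos (lens : List Int) (level r : Int) (h0 : 0 < r)
    (h1 : r ≤ pvCnt lens level) :
    pvDecFirst (pvWf lens level r) (level + 1) = pvWf lens level (r - 1) := by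
  induction lens with
  | nil => simp [pvCnt] at h1; omega
  | cons x xs ih =>
    rw [pvCnt_cons] at h1
    have hc0 := pvCnt_nonneg xs level
    by_cases hb : level < x ∧ pvCnt xs level < r
    · -- head is the first maximum; it is decremented to `level`
      have hsucc : pvCnt xs level ≤ r - 1 := by
        rw [if_pos hb.1] at h1; omega
      have e1 : pvWf (x :: xs) level r = (level + 1) :: pvWf xs level r := by
        simp only [pvWf, if_pos hb]
      have hb' : ¬ (level < x ∧ pvCnt xs level < r - 1) := by omega
      have e3 : pvWf (x :: xs) level (r - 1) = min x level :: pvWf xs level (r - 1) := by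
        simp only [pvWf, if_neg hb']
      rw [e1, e3, pvWf_saturated xs level r (by omega),
        pvWf_saturated xs level (r - 1) (by omega)]
      simp [pvDecFirst]
      omega
    · -- head below the maximum; the decrement happens in the tail
      have hr : r ≤ pvCnt xs level := by
        rcases Decidable.not_and_iff_not_or_not.mp hb with hx | hc
        · split_ifs at h1 <;> omega
        · omega
      have hhead : ¬ (min x level = level + 1) := by omega
      have hb'' : ¬ (level < x ∧ pvCnt xs level < r - 1) := by omega
      have e1 : pvWf (x :: xs) level r = min x level :: pvWf xs level r := by
        simp only [pvWf, if_neg hb]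
      have e3 : pvWf (x :: xs) level (r - 1) = min x level :: pvWf xs level (r - 1) := by
        simp only [pvWf, if_neg hb'']
      rw [e1, e3]
      simp [pvDecFirst, hhead, ih hr]

theorem pvDecFirst_map_min (lens : List Int) (level : Int)
    (h : 1 ≤ pvCnt lens (level - 1)) :
    pvDecFirst (lens.map (fun l => min l level)) level
      = pvWf lens (level - 1) (pvCnt lens (level - 1) - 1) := by
  induction lens with
  | nil => simp [pvCnt] at h
  | cons x xs ih =>
    rw [pvCnt_cons] at h ⊢
    have hc0 := pvCnt_nonneg xs (level - 1)
    have hlevel : level - 1 + 1 = level := by omega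
    by_cases hx : level ≤ x
    · -- head clips to `level`, the first maximum: decremented to level - 1
      rw [if_pos (by omega : level - 1 < x)] at h ⊢
      have hmin : min x level = level := by omega
      have hb' : ¬ (level - 1 < x ∧ pvCnt xs (level - 1) < pvCnt xs (level - 1) + 1 - 1) := by
        omega
      have e3 : pvWf (x :: xs) (level - 1) (pvCnt xs (level - 1) + 1 - 1)
          = min x (level - 1) :: pvWf xs (level - 1) (pvCnt xs (level - 1) + 1 - 1) := by
        simp only [pvWf, if_neg hb']
      rw [List.map_cons, hmin, e3, pvWf_saturated xs (level - 1) _ (by omega), hlevel]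
      simp [pvDecFirst]
      omega
    · -- head stays below `level`; the decrement happens in the tail
      rw [if_neg (by omega : ¬ (level - 1 < x))] at h ⊢
      have hmin : min x level = x := by omega
      have hb'' : ¬ (level - 1 < x ∧ pvCnt xs (level - 1) < pvCnt xs (level - 1) + 0 - 1) := by
        omega
      have e3 : pvWf (x :: xs) (level - 1) (pvCnt xs (level - 1) + 0 - 1)
          = min x (level - 1) :: pvWf xs (level - 1) (pvCnt xs (level - 1) + 0 - 1) := by
        simp only [pvWf, if_neg hb'']
      have hxl : ¬ (x = level) := by omega
      rw [List.map_cons, hmin, e3]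
      have harg : pvCnt xs (level - 1) + 0 - 1 = pvCnt xs (level - 1) - 1 := by omega
      rw [harg]
      simp [pvDecFirst, hxl, ih (by omega : 1 ≤ pvCnt xs (level - 1))]
      omega

-- one loop iteration preserves the invariant
theorem pvStep (lens : List Int) (m level r : Int) (hinv : pvInv lens m level r) :
    ∃ level' r', pvInv lens (m - 1) level' r' ∧
      pvGstep (pvWf lens level r) = pvWf lens level' r' := by
  obtain ⟨hle, hlt, hr⟩ := hinv
  have hcnt : pvFilled lens (level + 1) = pvFilled lens level + pvCnt lens level :=
    pvFilled_succ lens level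
  have hrlt : r < pvCnt lens level := by omega
  have hr0 : 0 ≤ r := by omega
  have hex : ∃ x ∈ lens, level < x := by
    by_contra hno
    push_neg at hno
    have hz : lens.countP (fun l => decide (level < l)) = 0 := by
      rw [List.countP_eq_zero]
      intro a ha
      simpa using hno a ha
    have : pvCnt lens level = 0 := by unfold pvCnt; rw [hz]; rfl
    omega
  obtain ⟨x0, hx0, hx0lt⟩ := hex
  have hne : lens ≠ [] := by intro h; subst h; simp at hx0
  have hwfne : pvWf lens level r ≠ [] := by
    intro h
    have hlen := pvWf_length lens level r
    rw [h] at hlen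
    simp only [List.length_nil] at hlen
    exact hne (List.eq_nil_of_length_eq_zero hlen.symm)
  by_cases hpos : 0 < r
  · refine ⟨level, r - 1, ⟨by omega, by omega, by omega⟩, ?_⟩
    rw [pvGstep_eq_decFirst _ hwfne,
      pvMax_eq _ (level + 1) (pvWf_mem_top lens level r hpos (by omega)) (pvWf_le lens level r)]
    exact pvDecFirst_wf_pos lens level r hpos (by omega)
  · have hrz : r = 0 := by omega
    have hc1 : 1 ≤ pvCnt lens (level - 1) :=
      le_trans (pvCnt_pos lens level x0 hx0 hx0lt) (pvCnt_mono lens (by omega))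
    have hl1 : level - 1 + 1 = level := by omega
    have hfs : pvFilled lens level = pvFilled lens (level - 1) + pvCnt lens (level - 1) := by
      have := pvFilled_succ lens (level - 1)
      rw [hl1] at this
      exact this
    refine ⟨level - 1, pvCnt lens (level - 1) - 1, ⟨by omega, by rw [hl1]; omega, by omega⟩, ?_⟩
    rw [pvWf_zero lens level r (by omega)]
    have hmem : level ∈ lens.map (fun l => min l level) :=
      List.mem_map.mpr ⟨x0, hx0, by omega⟩
    have hub : ∀ y ∈ lens.map (fun l => min l level), y ≤ level := by
      intro y hy
      obtain ⟨l, _, hl⟩ := List.mem_map.mp hy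
      omega
    rw [pvGstep_eq_decFirst _ (by intro h; rw [h] at hmem; simp at hmem),
      pvMax_eq _ level hmem hub]
    exact pvDecFirst_map_min lens level hc1

theorem pvIter (k : Nat) (lens : List Int) (m level r : Int) (hinv : pvInv lens m level r) :
    ∃ level' r', pvInv lens (m - k) level' r' ∧
      pvGstep^[k] (pvWf lens level r) = pvWf lens level' r' := by
  induction k generalizing m level r with
  | zero => exact ⟨level, r, by simpa using hinv, by simp⟩
  | succ k ih =>
    obtain ⟨L1, r1, hinv1, hstate1⟩ := pvStep lens m level r hinv
    obtain ⟨L2, r2, hinv2, hstate2⟩ := ih (m - 1) L1 r1 hinv1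
    refine ⟨L2, r2, ?_, ?_⟩
    · have he : m - 1 - (k : Int) = m - ((k + 1 : Nat) : Int) := by push_cast; ring
      rwa [he] at hinv2
    · rw [Function.iterate_succ_apply, hstate1, hstate2]

theorem pvInv_unique (lens : List Int) (m level r level' r' : Int)
    (h : pvInv lens m level r) (h' : pvInv lens m level' r') : level = level' ∧ r = r' := by
  obtain ⟨a1, a2, a3⟩ := h
  obtain ⟨b1, b2, b3⟩ := h'
  have hll : level = level' := by
    by_contra hne
    rcases lt_or_gt_of_ne hne with hlt | hgt
    · have := pvFilled_mono lens (by omega : level + 1 ≤ level')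
      omega
    · have := pvFilled_mono lens (by omega : level' + 1 ≤ level)
      omega
  subst hll
  exact ⟨rfl, by omega⟩

theorem pvBsearch_fuel (lens : List Int) (m : Int) (n : Nat) :
    ∀ lo hi : Int, (hi - lo).toNat ≤ n → pvFilled lens lo ≤ m → m < pvFilled lens hi →
      lo < hi →
      pvFilled lens (pvBsearch lens m lo hi) ≤ m ∧
        m < pvFilled lens (pvBsearch lens m lo hi + 1) := by
  induction n with
  | zero => intro lo hi hn _ _ hlt; omega
  | succ n ih =>
    intro lo hi hn hlo hhi hlt
    rw [pvBsearch]
    by_cases h1 : hi - lo ≤ 1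
    · rw [dif_pos h1]
      have : hi = lo + 1 := by omega
      subst this
      exact ⟨hlo, hhi⟩
    · rw [dif_neg h1]
      have hmid := pvMidBounds lo hi (by omega)
      by_cases h2 : pvFilled lens (PySem.Int.floordiv (lo + hi) 2) ≤ m
      · simp only [if_pos h2]
        exact ih _ hi (by omega) h2 hhi (by omega)
      · simp only [if_neg h2]
        exact ih lo _ (by omega) hlo (by omega) (by omega)

theorem pvBsearch_spec (lens : List Int) (m lo hi : Int) (hlo : pvFilled lens lo ≤ m)
    (hhi : m < pvFilled lens hi) (hlt : lo < hi) :
    pvInv lens m (pvBsearch lens m lo hi) (m - pvFilled lens (pvBsearch lens m lo hi)) := by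
  have h := pvBsearch_fuel lens m (hi - lo).toNat lo hi (le_refl _) hlo hhi hlt
  exact ⟨h.1, h.2, rfl⟩

theorem pvRevBuild_append (as : List Int) (x level r seen : Int) :
    pvRevBuild (as ++ [x]) level r seen
      = pvRevBuild as level r seen
        ++ [if level < x then (if seen + pvCnt as level + 1 ≤ r then level + 1 else level) else x] := by
  induction as generalizing seen with
  | nil =>
    simp only [List.nil_append, pvRevBuild, pvCnt, List.countP_nil, Nat.cast_zero, add_zero]
    split_ifs <;> rfl
  | cons a as ih =>
    simp only [List.cons_append, pvRevBuild]
    by_cases ha : level < a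
    · rw [if_pos ha, if_pos ha, ih, pvCnt_cons, if_pos ha]
      have e : seen + 1 + pvCnt as level + 1 = seen + (pvCnt as level + 1) + 1 := by ring
      rw [e, List.cons_append]
    · rw [if_neg ha, if_neg ha, ih, pvCnt_cons, if_neg ha, add_zero, List.cons_append]

theorem pvRevBuild_eq_wf (lens : List Int) (level r : Int) :
    (pvRevBuild lens.reverse level r 0).reverse = pvWf lens level r := by
  induction lens with
  | nil => rfl
  | cons x xs ih =>
    rw [List.reverse_cons, pvRevBuild_append, List.reverse_append]
    simp only [List.reverse_cons, List.reverse_nil, List.nil_append, List.singleton_append, ih]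
    simp only [pvWf, List.cons.injEq, and_true]
    have hcr : pvCnt xs.reverse level = pvCnt xs level := by
      unfold pvCnt; rw [List.countP_reverse]
    rw [hcr]
    split_ifs <;> omega

theorem fold_const {α β : Type} (l : List β) (f : α → α) (init : α) :
    l.foldl (fun s _ => f s) init = f^[l.length] init := by
  induction l generalizing init with
  | nil => rfl
  | cons b l ih => simp only [List.foldl_cons, List.length_cons, ih,
      Function.iterate_succ_apply]

theorem enumerate_map_eq_zip_map (seqs : List (List Int)) (ls : List Int)
    (hlen : ls.length = seqs.length) :
    (PySem.List.enumerate ls 0).map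
        (fun p => PySem.List.slice (PySem.List.pyGetD seqs p.1 []) none (some (p.2 - 1)))
      = (seqs.zip ls).map (fun p => PySem.List.slice p.1 none (some (p.2 - 1))) := by
  apply List.ext_getElem
  · simp [PySem.List.length_enumerate, hlen]
  · intro i h1 h2
    have hi : i < ls.length := by
      simpa [PySem.List.length_enumerate] using h1
    have his : i < seqs.length := by omega
    rw [List.getElem_map, List.getElem_map, PySem.List.getElem_enumerate ls 0 i
      (by simpa [PySem.List.length_enumerate] using hi), List.getElem_zip]
    simp only [zero_add]
    rw [PySem.List.pyGetD_eq_getElem seqs [] (by positivity) (by exact_mod_cast his)]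
    simp

-- ===== VERDICT (by name: the statement is the Claim_ definition above) =====
theorem adjust_sequences_spec : Claim_equal_adjust_sequences := by
  intro seqs max_len hdom hpre
  unfold Spec_adjust_sequences
  simp only [adjust_sequences, adjust_sequences_alt]
  split_ifs with h1 h2
  · rfl
  · omega
  · omega
  · -- main case: total > max_len
    set lens : List Int := seqs.map (fun s => ((s.length : Nat) : Int)) with hlensdef
    set M : Int := (PySem.List.max? lens (fun x => x)).getD 0 with hMdef
    have hsgt : max_len < lens.sum := by omega
    have hseqs : seqs ≠ [] := by
      intro h
      subst h
      simp [hlensdef] at hsgt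
      rcases hpre with h | h
      · exact h rfl
      · omega
    have hlensne : lens ≠ [] := by
      intro h
      rw [hlensdef] at h
      exact hseqs (List.map_eq_nil_iff.mp h)
    obtain ⟨M0, hM0⟩ : ∃ m, PySem.List.max? lens (fun x => x) = some m := by
      cases hm : PySem.List.max? lens (fun x => x) with
      | none => exact absurd ((PySem.List.max?_eq_none_iff lens _).mp hm) hlensne
      | some m => exact ⟨m, rfl⟩
    have hMeq : M = M0 := by rw [hMdef, hM0]; rfl
    have hMmem : M ∈ lens := by rw [hMeq]; exact PySem.List.max?_mem hM0
    have hub : ∀ l ∈ lens, l ≤ M := by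
      intro l hl
      rw [hMeq]
      exact PySem.List.max?_isMax hM0 l hl
    -- A's loop as an iterate of pvGstep
    have hfold : (PySem.List.pyRange 0 (lens.sum - max_len) 1).foldl
        (fun ls _ =>
          let mx := (PySem.List.max? ls (fun x => x)).getD 0
          let max_index := (PySem.List.index? ls mx).getD 0
          ls.set max_index (ls.getD max_index 0 - 1)) lens
        = pvGstep^[(lens.sum - max_len).toNat] lens := by
      rw [fold_const, PySem.List.length_pyRange_one]
      simp only [sub_zero]
      rfl
    -- the first iteration, from the raw lengths
    have hmapmin : lens.map (fun l => min l M) = lens := map_min_self lens M hub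
    have hc1 : 1 ≤ pvCnt lens (M - 1) := pvCnt_pos lens (M - 1) M hMmem (by omega)
    have hgl : pvGstep lens = pvWf lens (M - 1) (pvCnt lens (M - 1) - 1) := by
      rw [pvGstep_eq_decFirst lens hlensne, ← hMdef]
      calc pvDecFirst lens M
          = pvDecFirst (lens.map (fun l => min l M)) M := by rw [hmapmin]
        _ = pvWf lens (M - 1) (pvCnt lens (M - 1) - 1) := pvDecFirst_map_min lens M hc1
    have hl1 : M - 1 + 1 = M := by omega
    have hfilledM : pvFilled lens M = lens.sum := pvFilled_of_le lens M hub
    have hfs : pvFilled lens M = pvFilled lens (M - 1) + pvCnt lens (M - 1) := by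
      have h := pvFilled_succ lens (M - 1)
      rw [hl1] at h
      exact h
    have hinv0 : pvInv lens (lens.sum - 1) (M - 1) (pvCnt lens (M - 1) - 1) := by
      refine ⟨by omega, ?_, by omega⟩
      rw [hl1]
      omega
    obtain ⟨Lf, rf, hinvA, hiter⟩ :=
      pvIter (lens.sum - max_len - 1).toNat lens (lens.sum - 1) (M - 1)
        (pvCnt lens (M - 1) - 1) hinv0
    have hmadj : lens.sum - 1 - ((lens.sum - max_len - 1).toNat : Int) = max_len := by omega
    rw [hmadj] at hinvA
    have hstate : pvGstep^[(lens.sum - max_len).toNat] lens = pvWf lens Lf rf := by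
      have hk : (lens.sum - max_len).toNat = (lens.sum - max_len - 1).toNat + 1 := by omega
      rw [hk, Function.iterate_succ_apply, hgl, hiter]
    -- B's binary search finds the same invariant pair
    have hlen0 : lens.length ≠ 0 := fun h => hlensne (List.eq_nil_of_length_eq_zero h)
    have hnpos : (0 : Int) < (lens.length : Int) := by exact_mod_cast Nat.pos_of_ne_zero hlen0
    have hmod := PySem.Int.floordiv_mul_add_mod max_len (lens.length : Int)
    have hmodpos : 0 ≤ PySem.Int.mod max_len (lens.length : Int) := by
      rw [PySem.Int.mod_eq_emod_of_pos hnpos]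
      exact Int.emod_nonneg max_len (by omega)
    have hlofill : pvFilled lens (PySem.Int.floordiv max_len (lens.length : Int)) ≤ max_len := by
      have h := pvFilled_le lens (PySem.Int.floordiv max_len (lens.length : Int))
      have hcomm : (lens.length : Int) * PySem.Int.floordiv max_len (lens.length : Int)
          = PySem.Int.floordiv max_len (lens.length : Int) * (lens.length : Int) :=
        mul_comm _ _
      omega
    have hhifill : max_len < pvFilled lens M := by omega
    have hlolt : PySem.Int.floordiv max_len (lens.length : Int) < M := by
      by_contra hcon
      have := pvFilled_mono lens (by omega :
        M ≤ PySem.Int.floordiv max_len (lens.length : Int))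
      omega
    have hinvB := pvBsearch_spec lens max_len _ M hlofill hhifill hlolt
    obtain ⟨hLL, hrr⟩ := pvInv_unique lens max_len _ _ _ _ hinvA hinvB
    have hnl : (pvRevBuild lens.reverse
          (pvBsearch lens max_len (PySem.Int.floordiv max_len (lens.length : Int)) M)
          (max_len - pvFilled lens
            (pvBsearch lens max_len (PySem.Int.floordiv max_len (lens.length : Int)) M))
          0).reverse = pvWf lens Lf rf := by
      rw [pvRevBuild_eq_wf, ← hLL, hrr, ← hLL]
    rw [hfold, hstate, hnl, Prod.mk.injEq]
    refine ⟨?_, rfl⟩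
    apply enumerate_map_eq_zip_map
    rw [pvWf_length, hlensdef, List.length_map]
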